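-- pv_equiv track=rewrite | github.com/nael2965/AI-Scene-Organizer-Pro | utils.py | _handle_nested_json
-- ===== SOURCE A (Python) =====
-- def _handle_nested_json(json_str):
--     """중첩된 JSON 문자열 문제를 해결합니다."""
--     # 이스케이프된 따옴표 처리
--     json_str = json_str.replace('\\"', '"')
--
--     # 중첩된 JSON 문자열 정규화
--     stack = []
--     normalized = []
--     in_string = False
--     escape_next = False
--
--     for char in json_str:
--         if escape_next:
--             escape_next = False
--             normalized.append(char)
--             continue
--
--         if char == '\\':
--             escape_next = True
--             normalized.append(char)
--             continue
--
--         if char == '"' and not escape_next: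
--             in_string = not in_string
--
--         if in_string:
--             normalized.append(char)
--         else:
--             if char in '{[':
--                 stack.append(char)
--                 normalized.append(char)
--             elif char in '}]':
--                 if stack:
--                     stack.pop()
--                 normalized.append(char)
--             else:
--                 normalized.append(char)
--
--     return ''.join(normalized)
-- ===== SOURCE B (Python) =====
-- def _handle_nested_json(json_str):
--     """중첩된 JSON 문자열 문제를 해결합니다."""
--     # A's scan appends every character exactly once in every branch, so the
--     # stack/in_string/escape_next state never affects the output: the result
--     # is just the input after the escaped-quote replacement.
--     return json_str.replace('\\"', '"')
-- ===== Notes on version B (the rewrite author's own statement) =====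
-- stated objective: simpler
-- what changed: Replaced A's stateful character-by-character scan (stack/in_string/escape_next book-keeping) by a single str.replace, after proving the scan's state is dead: every branch appends the character unchanged.
import Mathlib
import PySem

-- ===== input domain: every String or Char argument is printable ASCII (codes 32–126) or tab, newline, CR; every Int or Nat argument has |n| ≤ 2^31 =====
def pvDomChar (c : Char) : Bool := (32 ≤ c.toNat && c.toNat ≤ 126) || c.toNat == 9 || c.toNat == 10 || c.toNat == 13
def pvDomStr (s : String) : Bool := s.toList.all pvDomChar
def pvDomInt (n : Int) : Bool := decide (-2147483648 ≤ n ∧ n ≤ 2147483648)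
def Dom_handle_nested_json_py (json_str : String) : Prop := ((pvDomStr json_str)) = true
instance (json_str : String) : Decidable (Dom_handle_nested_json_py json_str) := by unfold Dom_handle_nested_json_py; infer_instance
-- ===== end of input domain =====

-- B replaces A's stateful character scan (whose state never affects output) by the single escaped-quote replacement; objective: simpler.


-- ===== PORT A =====
-- state: (stack, normalized, in_string, escape_next)
def pvStepA (st : List Char × List Char × Bool × Bool) (c : Char) :
    List Char × List Char × Bool × Bool :=
  let (stack, normalized, in_string, escape_next) := st
  if escape_next then
    (stack, normalized ++ [c], in_string, false)
  else if c = '\\' then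
    (stack, normalized ++ [c], in_string, true)
  else
    let in_string := if c = '"' ∧ escape_next = false then !in_string else in_string
    if in_string then
      (stack, normalized ++ [c], in_string, escape_next)
    else if c = '{' ∨ c = '[' then
      (stack ++ [c], normalized ++ [c], in_string, escape_next)
    else if c = '}' ∨ c = ']' then
      ((if stack ≠ [] then stack.dropLast else stack), normalized ++ [c], in_string, escape_next)
    else
      (stack, normalized ++ [c], in_string, escape_next)

def handle_nested_json_py (json_str : String) : String :=
  let json_str := PySem.Str.replace json_str "\\\"" "\""
  let st := json_str.toList.foldl pvStepA ([], [], false, false)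
  String.ofList st.2.1

-- ===== PORT B =====
def handle_nested_json_py_alt (json_str : String) : String :=
  PySem.Str.replace json_str "\\\"" "\""

-- ===== PRECONDITION & SPEC =====
def Spec_handle_nested_json_py (json_str : String) (out : String) : Prop := out = handle_nested_json_py_alt json_str
instance (json_str : String) (out : String) : Decidable (Spec_handle_nested_json_py json_str out) := by unfold Spec_handle_nested_json_py; infer_instance

-- ===== CLAIM (what is proved, stated in full; the proofs are below) =====
def Claim_equal_handle_nested_json_py : Prop := ∀ (json_str : String), Dom_handle_nested_json_py json_str → Spec_handle_nested_json_py json_str (handle_nested_json_py json_str)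

-- ===== LEMMAS AND PROOFS =====
-- Every branch of pvStepA appends c to the normalized accumulator, so the
-- fold's normalized component is the starting accumulator followed by the input.
theorem pvStepA_norm (st : List Char × List Char × Bool × Bool) (c : Char) :
    (pvStepA st c).2.1 = st.2.1 ++ [c] := by
  obtain ⟨stack, normalized, in_string, escape_next⟩ := st
  simp only [pvStepA]
  split_ifs <;> rfl

theorem foldl_pvStepA_norm (l : List Char) (st : List Char × List Char × Bool × Bool) :
    (l.foldl pvStepA st).2.1 = st.2.1 ++ l := by
  induction l generalizing st with
  | nil => simp
  | cons c l ih => simp [List.foldl_cons, ih, pvStepA_norm]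

-- ===== VERDICT (by name: the statement is the Claim_ definition above) =====
theorem handle_nested_json_py_spec : Claim_equal_handle_nested_json_py := by
  intro json_str _
  show handle_nested_json_py json_str = handle_nested_json_py_alt json_str
  simp only [handle_nested_json_py, handle_nested_json_py_alt]
  rw [foldl_pvStepA_norm]
  simp [PySem.Str.replace]
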